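-- pv_equiv track=rewrite | github.com/Nalini-Ramagoni/phishcheck | Process_Codes/grpahexcel.py | find_url_column
-- ===== SOURCE A (Python) =====
-- def find_url_column(cols):
--     # Try common url column names
--     for c in cols:
--         if c.lower() == "url":
--             return c
--     # Try fuzzy
--     for c in cols:
--         if 'url' in c.lower():
--             return c
--     return None
-- ===== SOURCE B (Python) =====
-- def find_url_column(cols):
--     # One pass: return exact match immediately, remember first fuzzy candidate.
--     fuzzy = None
--     for c in cols:
--         low = c.lower()
--         if low == "url":
--             return c
--         if fuzzy is None and 'url' in low:
--             fuzzy = c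
--     return fuzzy
-- ===== Notes on version B (the rewrite author's own statement) =====
-- stated objective: alternative
-- what changed: Replaces A's two sequential scans (exact-match scan, then fuzzy-substring scan) with a single pass that returns an exact match immediately and remembers the first fuzzy candidate as a fallback.
import Mathlib
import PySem

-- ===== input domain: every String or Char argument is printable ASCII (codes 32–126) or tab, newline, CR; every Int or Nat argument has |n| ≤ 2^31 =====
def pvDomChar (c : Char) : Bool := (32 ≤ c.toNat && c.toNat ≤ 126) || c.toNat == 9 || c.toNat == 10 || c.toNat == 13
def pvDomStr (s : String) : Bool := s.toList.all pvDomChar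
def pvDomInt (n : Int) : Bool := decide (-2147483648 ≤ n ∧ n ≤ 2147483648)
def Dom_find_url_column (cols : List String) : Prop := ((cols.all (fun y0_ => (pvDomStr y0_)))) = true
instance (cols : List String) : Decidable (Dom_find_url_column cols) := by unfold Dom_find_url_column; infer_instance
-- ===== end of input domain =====

-- B replaces A's two sequential scans with a single pass keeping a fuzzy fallback candidate (alternative decomposition, same cost).


-- ===== PORT A =====
-- first loop: first c with c.lower() == "url"; second loop: first c with 'url' in c.lower(); else None
def find_url_column (cols : List String) : Option String :=
  match cols.find? (fun c => PySem.Str.lower c == "url") with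
  | some c => some c
  | none => cols.find? (fun c => PySem.Str.isIn "url" (PySem.Str.lower c))

-- ===== PORT B =====
-- single pass with remembered fuzzy candidate
def findUrlAltGo : List String → Option String → Option String
  | [], fuzzy => fuzzy
  | c :: rest, fuzzy =>
    let low := PySem.Str.lower c
    if low == "url" then some c
    else findUrlAltGo rest
      (if fuzzy.isNone && PySem.Str.isIn "url" low then some c else fuzzy)

def find_url_column_alt (cols : List String) : Option String :=
  findUrlAltGo cols none

-- ===== PRECONDITION & SPEC =====
def Spec_find_url_column (cols : List String) (out : Option String) : Prop := out = find_url_column_alt cols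
instance (cols : List String) (out : Option String) : Decidable (Spec_find_url_column cols out) := by unfold Spec_find_url_column; infer_instance

-- ===== CLAIM (what is proved, stated in full; the proofs are below) =====
def Claim_equal_find_url_column : Prop := ∀ (cols : List String), Dom_find_url_column cols → Spec_find_url_column cols (find_url_column cols)

-- ===== LEMMAS AND PROOFS =====
lemma findUrlAltGo_eq (cols : List String) : ∀ (fuzzy : Option String),
    findUrlAltGo cols fuzzy =
      match cols.find? (fun c => PySem.Str.lower c == "url") with
      | some c => some c
      | none => fuzzy.orElse (fun _ => cols.find? (fun c => PySem.Str.isIn "url" (PySem.Str.lower c))) := by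
  induction cols with
  | nil => intro fuzzy; cases fuzzy <;> simp [findUrlAltGo, Option.orElse]
  | cons c rest ih =>
    intro fuzzy
    simp only [findUrlAltGo, List.find?_cons]
    by_cases hx : PySem.Str.lower c == "url"
    · simp [hx]
    · simp only [hx, Bool.false_eq_true, if_false, ih]
      cases rest.find? (fun c => PySem.Str.lower c == "url") with
      | some d => simp
      | none =>
        cases fuzzy with
        | some f => simp [Option.orElse]
        | none =>
          simp only [PySem.Str.isIn] at *
          by_cases hf : PySem.Chars.isIn ['u', 'r', 'l'] (PySem.Chars.lower c.toList) <;>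
            simp [hf, Option.orElse]

-- ===== VERDICT (by name: the statement is the Claim_ definition above) =====
theorem find_url_column_spec : Claim_equal_find_url_column := by
  intro cols _
  unfold Spec_find_url_column find_url_column find_url_column_alt
  rw [findUrlAltGo_eq]
  cases cols.find? (fun c => PySem.Str.lower c == "url") <;> simp [Option.orElse]
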